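-- pv_equiv track=rewrite | github.com/RA-CONSULTING/aureon-trading | aureon/vault/fibonacci_shuffler.py | stride_sequence
-- ===== SOURCE A (Python) =====
-- from typing import Iterable, List
--
-- FIB_STEPS: List[int] = [1, 1, 2, 3, 5, 8, 13, 21, 34, 55, 89, 144]
--
-- def stride_sequence(length: int) -> List[int]:
--     """Return the stride walker's positions for a deck of given length."""
--     if length <= 0:
--         return []
--     seq = []
--     position = 0
--     for i in range(length):
--         seq.append(position)
--         step = FIB_STEPS[i % len(FIB_STEPS)]
--         position = (position + step) % length
--     return seq
-- ===== SOURCE B (Python) =====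
-- from typing import List
--
-- FIB_STEPS: List[int] = [1, 1, 2, 3, 5, 8, 13, 21, 34, 55, 89, 144]
--
-- # prefix sums of FIB_STEPS (before each element) and the full-cycle total
-- _CUM: List[int] = [0, 1, 2, 4, 7, 12, 20, 33, 54, 88, 143, 232]
-- _CYCLE: int = 376
--
--
-- def stride_sequence(length: int) -> List[int]:
--     """Return the stride walker's positions for a deck of given length."""
--     if length <= 0:
--         return []
--     return [(_CYCLE * (i // 12) + _CUM[i % 12]) % length for i in range(length)]
-- ===== Notes on version B (the rewrite author's own statement) =====
-- stated objective: alternative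
-- what changed: Replaces A's fused add-and-mod accumulator loop with a stateless closed form: position i is computed directly as (376*(i//12) + CUM[i%12]) % length from a precomputed cycle-prefix table, with no running state.
import Mathlib
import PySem

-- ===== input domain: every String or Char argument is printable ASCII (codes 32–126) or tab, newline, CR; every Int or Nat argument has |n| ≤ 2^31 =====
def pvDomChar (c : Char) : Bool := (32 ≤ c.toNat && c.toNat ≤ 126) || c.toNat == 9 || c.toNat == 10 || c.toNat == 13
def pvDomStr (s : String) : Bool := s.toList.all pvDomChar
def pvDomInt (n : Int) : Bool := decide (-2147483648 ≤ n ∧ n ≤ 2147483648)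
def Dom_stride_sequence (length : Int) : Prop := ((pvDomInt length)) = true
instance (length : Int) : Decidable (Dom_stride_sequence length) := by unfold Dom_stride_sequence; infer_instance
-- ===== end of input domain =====

-- B replaces A's fused add-and-mod accumulator loop with a stateless closed form per index
-- (cycle-prefix table of FIB_STEPS); a genuinely different decomposition of the same cost.


-- ===== PORT A =====
def pvFib : List Int := [1, 1, 2, 3, 5, 8, 13, 21, 34, 55, 89, 144]

def stride_sequence (length : Int) : List Int :=
  if length ≤ 0 then []
  else
    (((PySem.List.pyRange 0 length 1).foldl
        (fun (st : List Int × Int) i =>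
          let seq := st.1 ++ [st.2]
          let step := PySem.List.pyGetD pvFib (PySem.Int.mod i 12) 0
          (seq, PySem.Int.mod (st.2 + step) length))
        ([], 0))).1

-- ===== PORT B =====
def pvCum : List Int := [0, 1, 2, 4, 7, 12, 20, 33, 54, 88, 143, 232]

def stride_sequence_alt (length : Int) : List Int :=
  if length ≤ 0 then []
  else
    (PySem.List.pyRange 0 length 1).map
      (fun i =>
        PySem.Int.mod (376 * PySem.Int.floordiv i 12 + PySem.List.pyGetD pvCum (PySem.Int.mod i 12) 0) length)

-- ===== PRECONDITION & SPEC =====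
def Spec_stride_sequence (length : Int) (out : List Int) : Prop := out = stride_sequence_alt length
instance (length : Int) (out : List Int) : Decidable (Spec_stride_sequence length out) := by unfold Spec_stride_sequence; infer_instance

-- ===== CLAIM (what is proved, stated in full; the proofs are below) =====
def Claim_equal_stride_sequence : Prop := ∀ (length : Int), Dom_stride_sequence length → Spec_stride_sequence length (stride_sequence length)

-- ===== LEMMAS AND PROOFS =====

/-- Prefix sum of the infinitely repeated FIB_STEPS cycle, in closed form. -/
def pvS (i : Nat) : Int := 376 * ((i / 12 : Nat) : Int) + pvCum.getD (i % 12) 0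

theorem pvS_succ (i : Nat) : pvS (i + 1) = pvS i + pvFib.getD (i % 12) 0 := by
  obtain ⟨q, r, hr, rfl⟩ : ∃ q r, r < 12 ∧ i = 12 * q + r :=
    ⟨i / 12, i % 12, by omega, by omega⟩
  have hd : (12 * q + r) / 12 = q := by omega
  have hm : (12 * q + r) % 12 = r := by omega
  rcases (by omega : r + 1 < 12 ∨ r = 11) with h | h
  · have hd1 : (12 * q + r + 1) / 12 = q := by omega
    have hm1 : (12 * q + r + 1) % 12 = r + 1 := by omega
    simp only [pvS, hd, hm, hd1, hm1]
    interval_cases r <;> simp [pvCum, pvFib] <;> omega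
  · subst h
    have hd1 : (12 * q + 11 + 1) / 12 = q + 1 := by omega
    have hm1 : (12 * q + 11 + 1) % 12 = 0 := by omega
    simp only [pvS, hd, hm, hd1, hm1]
    simp [pvCum, pvFib]
    ring

theorem pvStep (L : Int) (hL : 0 < L) (k : Nat) :
    PySem.Int.mod (PySem.Int.mod (pvS k) L + PySem.List.pyGetD pvFib (PySem.Int.mod (k : Int) 12) 0) L
      = PySem.Int.mod (pvS (k + 1)) L := by
  have h12 : ((12 : Nat) : Int) = (12 : Int) := by norm_num
  rw [← h12, PySem.Int.mod_natCast, PySem.List.pyGetD_natCast,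
    PySem.Int.mod_eq_emod_of_pos hL, PySem.Int.mod_eq_emod_of_pos hL,
    PySem.Int.mod_eq_emod_of_pos hL, Int.emod_add_emod, pvS_succ]

theorem pvLoopA (L : Int) (hL : 0 < L) :
    ∀ (m k : Nat) (seq : List Int),
      (List.foldl
        (fun (st : List Int × Int) i =>
          (st.1 ++ [st.2], PySem.Int.mod (st.2 + PySem.List.pyGetD pvFib (PySem.Int.mod i 12) 0) L))
        (seq, PySem.Int.mod (pvS k) L)
        ((List.range' k m).map (fun j : Nat => (j : Int)))).1
      = seq ++ (List.range' k m).map (fun i => PySem.Int.mod (pvS i) L) := by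
  intro m
  induction m with
  | zero => intro k seq; simp
  | succ m ih =>
    intro k seq
    rw [List.range'_succ, List.map_cons, List.foldl_cons, List.map_cons]
    show (List.foldl _
        ((seq ++ [PySem.Int.mod (pvS k) L]),
          PySem.Int.mod (PySem.Int.mod (pvS k) L + PySem.List.pyGetD pvFib (PySem.Int.mod (k : Int) 12) 0) L)
        ((List.range' (k + 1) m).map (fun j : Nat => (j : Int)))).1 = _
    rw [pvStep L hL k, ih (k + 1) (seq ++ [PySem.Int.mod (pvS k) L])]
    simp

theorem pvB_elem (L : Int) (i : Nat) :
    PySem.Int.mod (376 * PySem.Int.floordiv (i : Int) 12 + PySem.List.pyGetD pvCum (PySem.Int.mod (i : Int) 12) 0) L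
      = PySem.Int.mod (pvS i) L := by
  have h12 : ((12 : Nat) : Int) = (12 : Int) := by norm_num
  rw [← h12, PySem.Int.mod_natCast, PySem.Int.floordiv_natCast, PySem.List.pyGetD_natCast]
  rfl

-- ===== VERDICT (by name: the statement is the Claim_ definition above) =====
theorem stride_sequence_spec : Claim_equal_stride_sequence := by
  intro L _
  unfold Spec_stride_sequence stride_sequence stride_sequence_alt
  by_cases hL : L ≤ 0
  · simp [hL]
  · have hLpos : 0 < L := by omega
    have hn : L = ((L.toNat : Nat) : Int) := by omega
    simp only [if_neg hL]
    have hrange : PySem.List.pyRange 0 L 1 = (List.range' 0 L.toNat).map (fun j : Nat => (j : Int)) := by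
      conv_lhs => rw [hn]
      rw [PySem.List.pyRange_zero_natCast, List.range_eq_range']
    have h0 : PySem.Int.mod (pvS 0) L = 0 := by
      simp [pvS, pvCum, PySem.Int.mod_eq_emod_of_pos hLpos]
    have key := pvLoopA L hLpos L.toNat 0 []
    rw [h0] at key
    rw [hrange, key, List.map_map, List.nil_append]
    refine (List.map_congr_left ?_).symm
    intro i _
    exact pvB_elem L i
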